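-- pv_equiv track=rewrite | github.com/Twprcntmlk/My_Notes | DS&A/0.NotOnLeetCode/RemoveAllAdjDup_withK.py | removeDuplicatesStack
-- ===== SOURCE A (Python) =====
-- def removeDuplicatesStack(s, k):
--     stack = []
--     for val in s:
--         if not stack or stack[-1][0]!=val:
--             stack.append([val,1]) #use the array to "backtrack delete"
--         elif stack[-1][0]==val:
--             stack[-1][1]+=1
--         if stack[-1][1]>=k: #the backtracking
--             stack.pop()
--     return ''.join([stack[i][0]*stack[i][1] for i in range(len(stack))])
-- ===== SOURCE B (Python) =====
-- def removeDuplicatesStack(s, k):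
--     if k <= 0:
--         return ""
--     # phase 1: run-length encode s into (char, count) runs
--     runs = []
--     for ch in s:
--         if runs and runs[-1][0] == ch:
--             runs[-1][1] += 1
--         else:
--             runs.append([ch, 1])
--     # phase 2: fold whole runs onto a stack, reducing counts modulo k
--     stack = []
--     for c, m in runs:
--         if stack and stack[-1][0] == c:
--             m += stack.pop()[1]
--         m %= k
--         if m:
--             stack.append((c, m))
--     return "".join(c * m for c, m in stack)
-- ===== Notes on version B (the rewrite author's own statement) =====
-- stated objective: alternative
-- what changed: B first run-length-encodes s into (char,count) runs, then folds whole runs onto a stack reducing the merged count modulo k, instead of A's char-by-char increment with a pop exactly when a count reaches k.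
import Mathlib
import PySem

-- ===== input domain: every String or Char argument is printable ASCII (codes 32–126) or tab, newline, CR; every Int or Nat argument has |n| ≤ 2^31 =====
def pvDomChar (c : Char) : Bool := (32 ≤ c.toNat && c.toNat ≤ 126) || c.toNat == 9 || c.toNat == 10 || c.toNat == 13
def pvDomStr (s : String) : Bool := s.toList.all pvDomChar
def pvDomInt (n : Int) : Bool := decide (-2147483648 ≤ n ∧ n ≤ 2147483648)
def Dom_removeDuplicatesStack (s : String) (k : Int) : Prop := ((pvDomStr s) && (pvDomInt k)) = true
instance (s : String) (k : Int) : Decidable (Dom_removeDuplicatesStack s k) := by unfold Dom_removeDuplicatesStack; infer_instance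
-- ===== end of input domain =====

-- B replaces A's char-by-char stack with a run-length-encode pass followed by a
-- fold over whole runs that reduces counts modulo k (objective: alternative).

-- ===== PORT A =====
-- one iteration of A's loop; stack is kept top-first (Python appends/pops at the end)
def stepA (k : Int) (stack : List (Char × Int)) (val : Char) : List (Char × Int) :=
  let stack' :=
    match stack with
    | [] => [(val, (1 : Int))]
    | (c, n) :: rest => if c ≠ val then (val, 1) :: (c, n) :: rest else (c, n + 1) :: rest
  match stack' with
  | [] => []
  | (c, n) :: rest => if n ≥ k then rest else (c, n) :: rest

def removeDuplicatesStack (s : String) (k : Int) : String :=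
  String.mk (((s.toList.foldl (stepA k) []).reverse.map (fun p => List.replicate p.2.toNat p.1)).flatten)

-- ===== PORT B =====
-- phase 1 of Source B: run-length encoding, accumulator kept last-run-first
def rleStepB (acc : List (Char × Int)) (ch : Char) : List (Char × Int) :=
  match acc with
  | (c, n) :: rest => if c = ch then (c, n + 1) :: rest else (ch, 1) :: (c, n) :: rest
  | [] => [(ch, (1 : Int))]

-- phase 2 of Source B: push one whole run, merging with the top and reducing mod k
def bPush (k : Int) (stack : List (Char × Int)) (r : Char × Int) : List (Char × Int) :=
  let p :=
    match stack with
    | (c', n) :: rest => if c' = r.1 then (rest, r.2 + n) else ((c', n) :: rest, r.2)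
    | [] => ([], r.2)
  let m := PySem.Int.mod p.2 k
  if m ≠ 0 then (r.1, m) :: p.1 else p.1

def removeDuplicatesStack_alt (s : String) (k : Int) : String :=
  if k ≤ 0 then "" else
  String.mk (((((s.toList.foldl rleStepB []).reverse).foldl (bPush k) []).reverse.map
    (fun p => List.replicate p.2.toNat p.1)).flatten)

-- ===== PRECONDITION & SPEC =====
def Spec_removeDuplicatesStack (s : String) (k : Int) (out : String) : Prop := out = removeDuplicatesStack_alt s k
instance (s : String) (k : Int) (out : String) : Decidable (Spec_removeDuplicatesStack s k out) := by unfold Spec_removeDuplicatesStack; infer_instance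

-- ===== CLAIM (what is proved, stated in full; the proofs are below) =====
def Claim_equal_removeDuplicatesStack : Prop := ∀ (s : String) (k : Int), Dom_removeDuplicatesStack s k → Spec_removeDuplicatesStack s k (removeDuplicatesStack s k)

-- ===== LEMMAS AND PROOFS =====

-- invariant of both stacks: adjacent entries carry distinct chars, counts in [1, k-1]
def StackInv (k : Int) (stack : List (Char × Int)) : Prop :=
  List.IsChain (fun a b => a.1 ≠ b.1) stack ∧ ∀ p ∈ stack, 1 ≤ p.2 ∧ p.2 < k

theorem mod_pos_eq (m k : Int) (hk : 0 < k) : PySem.Int.mod m k = m % k :=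
  PySem.Int.mod_eq_emod_of_pos hk

theorem chain_push {c : Char} {n m : Int} {rest : List (Char × Int)}
    (h : List.IsChain (fun a b : Char × Int => a.1 ≠ b.1) ((c, n) :: rest)) :
    List.IsChain (fun a b : Char × Int => a.1 ≠ b.1) ((c, m) :: rest) := by
  cases rest with
  | nil => exact .singleton _
  | cons q t =>
      rw [List.isChain_cons_cons] at h ⊢
      exact ⟨h.1, h.2⟩

theorem stepA_eq_bPush (k : Int) (hk : 1 ≤ k) (stack : List (Char × Int)) (val : Char)
    (h : StackInv k stack) : stepA k stack val = bPush k stack (val, 1) := by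
  obtain ⟨hc, hb⟩ := h
  have hkpos : (0 : Int) < k := by omega
  cases stack with
  | nil =>
      by_cases h1 : (1 : Int) ≥ k
      · have hm : PySem.Int.mod 1 k = 0 := by
          rw [mod_pos_eq _ _ hkpos, show k = 1 by omega]; simp
        simp [stepA, bPush, h1, hm]
      · have hm : PySem.Int.mod 1 k = 1 := by
          rw [mod_pos_eq _ _ hkpos]; exact Int.emod_eq_of_lt (by omega) (by omega)
        simp [stepA, bPush, h1, hm]
  | cons p rest =>
      obtain ⟨c, n⟩ := p
      have hbn := hb (c, n) (List.mem_cons_self ..)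
      by_cases hcv : c = val
      · subst hcv
        by_cases h2 : n + 1 ≥ k
        · have hm : PySem.Int.mod (n + 1) k = 0 := by
            rw [mod_pos_eq _ _ hkpos, show (n + 1) = k by omega]; simp
          simp [stepA, bPush, h2, Int.add_comm 1 n, hm]
        · have hm : PySem.Int.mod (n + 1) k = n + 1 := by
            rw [mod_pos_eq _ _ hkpos]; exact Int.emod_eq_of_lt (by omega) (by omega)
          simp [stepA, bPush, h2, Int.add_comm 1 n, hm, show n + (1 : Int) ≠ 0 by omega]
      · by_cases h1 : (1 : Int) ≥ k
        · have hm : PySem.Int.mod 1 k = 0 := by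
            rw [mod_pos_eq _ _ hkpos, show k = 1 by omega]; simp
          simp [stepA, bPush, hcv, h1, hm]
        · have hm : PySem.Int.mod 1 k = 1 := by
            rw [mod_pos_eq _ _ hkpos]; exact Int.emod_eq_of_lt (by omega) (by omega)
          simp [stepA, bPush, hcv, h1, hm]

theorem inv_bPush (k : Int) (hk : 1 ≤ k) (stack : List (Char × Int)) (r : Char × Int)
    (h : StackInv k stack) : StackInv k (bPush k stack r) := by
  obtain ⟨hc, hb⟩ := h
  obtain ⟨c, m⟩ := r
  have hkpos : (0 : Int) < k := by omega
  have hmod : ∀ a : Int, PySem.Int.mod a k = a % k := fun a => mod_pos_eq a k hkpos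
  cases stack with
  | nil =>
      by_cases hz : m % k = 0
      · have e : bPush k [] (c, m) = [] := by simp [bPush, hmod, hz]
        rw [e]; exact ⟨.nil, by simp⟩
      · have e : bPush k [] (c, m) = [(c, m % k)] := by simp [bPush, hmod, hz]
        rw [e]
        refine ⟨.singleton _, ?_⟩
        intro p hp
        rw [List.mem_singleton] at hp; subst hp
        have := Int.emod_nonneg m (by omega : k ≠ 0)
        have := Int.emod_lt_of_pos m hkpos
        constructor <;> simp <;> omega
  | cons p rest =>
      obtain ⟨c', x⟩ := p
      by_cases hcc : c' = c
      · subst hcc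
        by_cases hz : (m + x) % k = 0
        · have e : bPush k ((c', x) :: rest) (c', m) = rest := by simp [bPush, hmod, hz]
          rw [e]
          exact ⟨hc.tail, fun p hp => hb p (List.mem_cons_of_mem _ hp)⟩
        · have e : bPush k ((c', x) :: rest) (c', m) = (c', (m + x) % k) :: rest := by
            simp [bPush, hmod, hz]
          rw [e]
          refine ⟨chain_push hc, ?_⟩
          intro p hp
          rcases List.mem_cons.1 hp with h' | h'
          · subst h'
            have := Int.emod_nonneg (m + x) (by omega : k ≠ 0)
            have := Int.emod_lt_of_pos (m + x) hkpos
            constructor <;> simp <;> omega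
          · exact hb _ (List.mem_cons_of_mem _ h')
      · by_cases hz : m % k = 0
        · have e : bPush k ((c', x) :: rest) (c, m) = (c', x) :: rest := by
            simp [bPush, hmod, hcc, hz]
          rw [e]; exact ⟨hc, hb⟩
        · have e : bPush k ((c', x) :: rest) (c, m) = (c, m % k) :: (c', x) :: rest := by
            simp [bPush, hmod, hcc, hz]
          rw [e]
          refine ⟨List.isChain_cons_cons.2 ⟨by simpa using Ne.symm hcc, hc⟩, ?_⟩
          intro p hp
          rcases List.mem_cons.1 hp with h' | h'
          · subst h'
            have := Int.emod_nonneg m (by omega : k ≠ 0)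
            have := Int.emod_lt_of_pos m hkpos
            constructor <;> simp <;> omega
          · exact hb _ h'

theorem inv_foldl_bPush (k : Int) (hk : 1 ≤ k) (stack : List (Char × Int))
    (l : List (Char × Int)) (h : StackInv k stack) : StackInv k (l.foldl (bPush k) stack) := by
  induction l generalizing stack with
  | nil => exact h
  | cons r l ih => exact ih _ (inv_bPush k hk stack r h)

theorem bPush_add (k : Int) (hk : 1 ≤ k) (stack : List (Char × Int)) (c : Char) (n m : Int)
    (h : StackInv k stack) : bPush k (bPush k stack (c, n)) (c, m) = bPush k stack (c, n + m) := by
  obtain ⟨hc, hb⟩ := h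
  have hkpos : (0 : Int) < k := by omega
  have hmod : ∀ a : Int, PySem.Int.mod a k = a % k := fun a => mod_pos_eq a k hkpos
  have hca : ∀ a b : Int, (a + b % k) % k = (a + b) % k := by
    intro a b
    conv_rhs => rw [Int.add_emod]
    rw [Int.add_emod a (b % k), Int.emod_emod_of_dvd _ dvd_rfl]
  cases stack with
  | nil =>
      by_cases hz : n % k = 0
      · have e : (n + m) % k = m % k := by
          rw [Int.add_comm, ← hca m n, hz, add_zero]
        simp [bPush, hmod, hz, e]
      · have e : (m + n % k) % k = (n + m) % k := by rw [hca, Int.add_comm]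
        simp [bPush, hmod, hz, e]
  | cons p rest =>
      obtain ⟨c', x⟩ := p
      by_cases hcc : c' = c
      · subst hcc
        by_cases hz : (n + x) % k = 0
        · have e : (n + m + x) % k = m % k := by
            rw [show n + m + x = m + (n + x) by ring, ← hca m (n + x), hz, add_zero]
          cases rest with
          | nil => simp [bPush, hmod, hz, e]
          | cons q t =>
              obtain ⟨d, y⟩ := q
              have hdc : d ≠ c' := by
                have := List.isChain_cons_cons.1 hc
                simpa using Ne.symm this.1
              simp [bPush, hmod, hz, hdc, e]
        · have e : (m + (n + x) % k) % k = (n + m + x) % k := by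
            rw [hca]; ring_nf
          simp [bPush, hmod, hz, e]
      · by_cases hz : n % k = 0
        · have e : (n + m) % k = m % k := by
            rw [Int.add_comm, ← hca m n, hz, add_zero]
          simp [bPush, hmod, hcc, hz, e]
        · have e : (m + n % k) % k = (n + m) % k := by rw [hca, Int.add_comm]
          simp [bPush, hmod, hcc, hz, e]

theorem foldA_eq (k : Int) (hk : 1 ≤ k) (l : List Char) (stack : List (Char × Int))
    (h : StackInv k stack) :
    l.foldl (stepA k) stack = (l.map (fun c => (c, (1 : Int)))).foldl (bPush k) stack := by
  induction l generalizing stack with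
  | nil => rfl
  | cons c l ih =>
      simp only [List.foldl_cons, List.map_cons]
      rw [stepA_eq_bPush k hk stack c h]
      exact ih _ (inv_bPush k hk stack (c, 1) h)

theorem rle_step_sem (k : Int) (hk : 1 ≤ k) (acc stack : List (Char × Int)) (ch : Char)
    (h : StackInv k stack) :
    ((rleStepB acc ch).reverse).foldl (bPush k) stack =
      (acc.reverse ++ [(ch, (1 : Int))]).foldl (bPush k) stack := by
  cases acc with
  | nil => rfl
  | cons p rest =>
      obtain ⟨c, n⟩ := p
      by_cases hcc : c = ch
      · subst hcc
        have e : (rleStepB ((c, n) :: rest) c).reverse = rest.reverse ++ [(c, n + 1)] := by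
          simp [rleStepB]
        rw [e, show ((c, n) :: rest).reverse = rest.reverse ++ [(c, n)] by simp,
          List.append_assoc, List.foldl_append, List.foldl_append]
        exact (bPush_add k hk _ c n 1 (inv_foldl_bPush k hk stack rest.reverse h)).symm
      · have e : (rleStepB ((c, n) :: rest) ch).reverse =
            ((c, n) :: rest).reverse ++ [(ch, 1)] := by simp [rleStepB, hcc]
        rw [e]

theorem rle_fold (k : Int) (hk : 1 ≤ k) (l : List Char) (acc stack : List (Char × Int))
    (h : StackInv k stack) :
    ((l.foldl rleStepB acc).reverse).foldl (bPush k) stack =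
      (acc.reverse ++ l.map (fun c => (c, (1 : Int)))).foldl (bPush k) stack := by
  induction l generalizing acc with
  | nil => simp
  | cons ch l ih =>
      simp only [List.foldl_cons, List.map_cons]
      rw [ih (rleStepB acc ch)]
      rw [show (ch, (1 : Int)) :: l.map (fun c => (c, (1 : Int))) =
            [(ch, (1 : Int))] ++ l.map (fun c => (c, (1 : Int))) by rfl,
        ← List.append_assoc, List.foldl_append, List.foldl_append,
        List.foldl_append, rle_step_sem k hk acc stack ch h, List.foldl_append]

theorem stackA_nil_of_k_nonpos (k : Int) (hk : k ≤ 0) (l : List Char) :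
    l.foldl (stepA k) [] = [] := by
  induction l with
  | nil => rfl
  | cons c l ih =>
      have h1 : stepA k [] c = [] := by
        simp [stepA]; omega
      simpa [h1] using ih

-- ===== VERDICT (by name: the statement is the Claim_ definition above) =====
theorem removeDuplicatesStack_spec : Claim_equal_removeDuplicatesStack := by
  intro s k _
  unfold Spec_removeDuplicatesStack removeDuplicatesStack removeDuplicatesStack_alt
  by_cases hk : k ≤ 0
  · simp [hk, stackA_nil_of_k_nonpos k hk]
    rfl
  · have hk1 : 1 ≤ k := by omega
    have hInv : StackInv k [] := ⟨.nil, by simp⟩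
    rw [if_neg hk]
    rw [foldA_eq k hk1 s.toList [] hInv, rle_fold k hk1 s.toList [] [] hInv]
    simp
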